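-- pv_equiv track=rewrite | github.com/zwygobest/python_homework | sem1/python-study/task8_selftest.py | generate_actions
-- ===== SOURCE A (Python) =====
-- def find_char_position(keyborad,char):
-- #     find the index of char
--     for r,row in enumerate(keyborad):
--         if char in row:
--             return (r,row.index(char))
--     return None
--
-- def generate_actions(keyboard,str):
--     action = ""
--     pos = (0,0)
--     for element in str:
--         tar_pos = find_char_position(keyboard,element)
--         if tar_pos is  None:
--             return None
--         r1 , c1 = pos
--         r2 , c2 = tar_pos
-- #         turn right
--         if (c2 > c1):
--             action += 'r' * (c2 - c1)
-- #         move left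
--         elif (c2 < c1):
--             action += 'l' * (c1 - c2)
-- #         move down
--         if (r2 > r1):
--             action += 'd' * (r2 - r1)
-- #         move up
--         elif (r2 < r1):
--             action += 'u' * (r1 - r2)
--         action += 'p'
--         pos = tar_pos
--     #     计算出 一个字符串的总路径
--     return action
-- ===== SOURCE B (Python) =====
-- def generate_actions(keyboard, str):
--     index = {}
--     for r, row in enumerate(keyboard):
--         for c, ch in enumerate(row):
--             index.setdefault(ch, (r, c))
--     positions = [index.get(ch) for ch in str]
--     if any(p is None for p in positions):
--         return None
--     parts = []
--     prev = (0, 0)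
--     for r2, c2 in positions:
--         r1, c1 = prev
--         dc, dr = c2 - c1, r2 - r1
--         parts.append(('r' * dc if dc > 0 else 'l' * -dc)
--                      + ('d' * dr if dr > 0 else 'u' * -dr) + 'p')
--         prev = (r2, c2)
--     return ''.join(parts)
-- ===== Notes on version B (the rewrite author's own statement) =====
-- stated objective: alternative
-- what changed: B precomputes a char->position index of the keyboard once (dict via setdefault), maps the word to a list of positions, and only then folds that list into per-character move strings joined at the end, instead of A's single loop that rescans the keyboard rows for every character while concatenating onto one action string.
import Mathlib
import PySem

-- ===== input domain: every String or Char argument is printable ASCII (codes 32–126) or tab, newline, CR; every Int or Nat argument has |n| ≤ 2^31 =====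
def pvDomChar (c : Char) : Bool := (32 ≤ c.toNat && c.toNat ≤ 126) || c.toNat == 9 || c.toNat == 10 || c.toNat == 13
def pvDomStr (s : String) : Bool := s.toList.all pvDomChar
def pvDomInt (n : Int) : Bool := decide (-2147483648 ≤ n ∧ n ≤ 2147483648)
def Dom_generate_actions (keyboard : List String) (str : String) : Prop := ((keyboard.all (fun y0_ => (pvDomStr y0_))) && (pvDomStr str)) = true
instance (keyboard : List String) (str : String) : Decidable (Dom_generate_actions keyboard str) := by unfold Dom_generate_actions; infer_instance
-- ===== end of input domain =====

-- B replaces A's per-character row-by-row scan by a keyboard index (dict) built once,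
-- and splits the single interleaved loop into a map-to-positions pass plus a fold that
-- joins per-character move strings (objective: alternative decomposition).

-- ===== PORT A =====
-- find_char_position: for r,row in enumerate(keyboard): if char in row: return (r, row.index(char))
def gaFindAux (ch : Char) : Nat → List String → Option (Nat × Nat)
  | _, [] => none
  | r, row :: rest =>
    if ch ∈ row.toList then some (r, row.toList.idxOf ch) else gaFindAux ch (r + 1) rest

def find_char_position (keyboard : List String) (ch : Char) : Option (Nat × Nat) :=
  gaFindAux ch 0 keyboard

-- the main loop of A, carrying action and pos
def gaLoop (keyboard : List String) : List Char → List Char → Nat × Nat → Option (List Char)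
  | [], action, _ => some action
  | e :: rest, action, (r1, c1) =>
    match find_char_position keyboard e with
    | none => none
    | some (r2, c2) =>
      let action := if c2 > c1 then action ++ List.replicate (c2 - c1) 'r'
                    else if c2 < c1 then action ++ List.replicate (c1 - c2) 'l' else action
      let action := if r2 > r1 then action ++ List.replicate (r2 - r1) 'd'
                    else if r2 < r1 then action ++ List.replicate (r1 - r2) 'u' else action
      gaLoop keyboard rest (action ++ ['p']) (r2, c2)

def generate_actions (keyboard : List String) (str : String) : Option String :=
  (gaLoop keyboard str.toList [] (0, 0)).map String.ofList

-- ===== PORT B =====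
-- index.setdefault(ch, (r, c))
def gaSetdefault (d : PySem.Dict Char (Nat × Nat)) (k : Char) (v : Nat × Nat) :
    PySem.Dict Char (Nat × Nat) :=
  if (d.get? k).isSome then d else d.insert k v

-- inner loop: for c, ch in enumerate(row)
def gaIdxRow (r : Nat) : Nat → List Char → PySem.Dict Char (Nat × Nat) → PySem.Dict Char (Nat × Nat)
  | _, [], d => d
  | c, ch :: rest, d => gaIdxRow r (c + 1) rest (gaSetdefault d ch (r, c))

-- outer loop: for r, row in enumerate(keyboard)
def gaIdxBuild : Nat → List String → PySem.Dict Char (Nat × Nat) → PySem.Dict Char (Nat × Nat)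
  | _, [], d => d
  | r, row :: rest, d => gaIdxBuild (r + 1) rest (gaIdxRow r 0 row.toList d)

-- one move string: ('r'*dc if dc>0 else 'l'*-dc) + ('d'*dr if dr>0 else 'u'*-dr) + 'p'
def gaEmit (prev tgt : Nat × Nat) : List Char :=
  let dc : Int := (tgt.2 : Int) - prev.2
  let dr : Int := (tgt.1 : Int) - prev.1
  (if dc > 0 then List.replicate dc.toNat 'r' else List.replicate (-dc).toNat 'l') ++
  (if dr > 0 then List.replicate dr.toNat 'd' else List.replicate (-dr).toNat 'u') ++ ['p']

def gaStep (st : (Nat × Nat) × List (List Char)) (p : Nat × Nat) :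
    (Nat × Nat) × List (List Char) :=
  (p, st.2 ++ [gaEmit st.1 p])

def generate_actions_alt (keyboard : List String) (str : String) : Option String :=
  let index := gaIdxBuild 0 keyboard PySem.Dict.empty
  let positions := str.toList.map (fun ch => index.get? ch)
  if positions.any Option.isNone then none
  else
    let parts := (positions.reduceOption.foldl gaStep ((0, 0), [])).2
    some (String.ofList parts.flatten)

-- ===== PRECONDITION & SPEC =====
def Spec_generate_actions (keyboard : List String) (str : String) (out : Option String) : Prop := out = generate_actions_alt keyboard str
instance (keyboard : List String) (str : String) (out : Option String) : Decidable (Spec_generate_actions keyboard str out) := by unfold Spec_generate_actions; infer_instance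

-- ===== CLAIM (what is proved, stated in full; the proofs are below) =====
def Claim_equal_generate_actions : Prop := ∀ (keyboard : List String) (str : String), Dom_generate_actions keyboard str → Spec_generate_actions keyboard str (generate_actions keyboard str)

-- ===== LEMMAS AND PROOFS =====

-- one row of setdefaults: first occurrence in the row wins, existing entries kept
theorem gaIdxRow_get? (r : Nat) (ch : Char) :
    ∀ (cs : List Char) (c0 : Nat) (d : PySem.Dict Char (Nat × Nat)),
      (gaIdxRow r c0 cs d).get? ch =
        ((d.get? ch).or ((cs.idxOf? ch).map (fun i => (r, c0 + i)))) := by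
  intro cs
  induction cs with
  | nil => intro c0 d; simp [gaIdxRow]
  | cons ch' cs ih =>
    intro c0 d
    rw [gaIdxRow, ih, List.idxOf?_cons]
    by_cases hch : ch' = ch
    · subst hch
      rw [if_pos (by simp)]
      unfold gaSetdefault
      rcases hd : d.get? ch' with _ | v
      · simp
      · simp [hd]
    · rw [if_neg (by simp [hch])]
      have hget : (gaSetdefault d ch' (r, c0)).get? ch = d.get? ch := by
        unfold gaSetdefault
        split
        · rfl
        · rw [PySem.Dict.get?_insert]
          rw [if_neg (fun h => hch h.symm)]
      rw [hget]
      rcases d.get? ch with _ | v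
      · simp only [Option.none_or]
        rcases cs.idxOf? ch with _ | i
        · simp
        · simp only [Option.map_some]
          congr 2
          omega
      · simp

-- the whole index: lookup = find_char_position starting at row r0
theorem gaIdxBuild_get? (ch : Char) :
    ∀ (rows : List String) (r0 : Nat) (d : PySem.Dict Char (Nat × Nat)),
      (gaIdxBuild r0 rows d).get? ch = ((d.get? ch).or (gaFindAux ch r0 rows)) := by
  intro rows
  induction rows with
  | nil => intro r0 d; simp [gaIdxBuild, gaFindAux]
  | cons row rest ih =>
    intro r0 d
    rw [gaIdxBuild, ih, gaIdxRow_get? r0 ch row.toList 0 d, Option.or_assoc]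
    congr 1
    rw [gaFindAux]
    by_cases hm : ch ∈ row.toList
    · rw [if_pos hm]
      have hs : (row.toList.idxOf? ch).isSome = true := List.isSome_idxOf?.mpr hm
      rcases hi : row.toList.idxOf? ch with _ | i
      · rw [hi] at hs; simp at hs
      · have hidx : row.toList.idxOf ch = i := by
          rw [List.idxOf_eq_getD_idxOf?, hi]; rfl
        simp [hidx]
    · rw [if_neg hm]
      have hn : row.toList.idxOf? ch = none := List.idxOf?_eq_none_iff.mpr hm
      simp [hn]

theorem gaIndex_get? (keyboard : List String) (ch : Char) :
    (gaIdxBuild 0 keyboard PySem.Dict.empty).get? ch = find_char_position keyboard ch := by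
  rw [gaIdxBuild_get? ch keyboard 0 PySem.Dict.empty]
  simp [find_char_position]

-- B's per-character move string equals A's (Int deltas vs Nat branches)
theorem gaEmit_eq (r1 c1 r2 c2 : Nat) :
    gaEmit (r1, c1) (r2, c2) =
      (if c2 > c1 then List.replicate (c2 - c1) 'r'
       else if c2 < c1 then List.replicate (c1 - c2) 'l' else []) ++
      (if r2 > r1 then List.replicate (r2 - r1) 'd'
       else if r2 < r1 then List.replicate (r1 - r2) 'u' else []) ++ ['p'] := by
  have hx : ∀ (a b : Nat) (cpos cneg : Char),
      (if ((b : Int) - a) > 0 then List.replicate ((b : Int) - a).toNat cpos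
       else List.replicate (-((b : Int) - a)).toNat cneg)
        = (if b > a then List.replicate (b - a) cpos
           else if b < a then List.replicate (a - b) cneg else []) := by
    intro a b cpos cneg
    rcases Nat.lt_trichotomy a b with h | h | h
    · rw [if_pos (by omega), if_pos h]
      congr 1
      omega
    · subst h
      rw [if_neg (by omega), if_neg (by omega), if_neg (by omega)]
      have h0 : (-((a : Int) - a)).toNat = 0 := by omega
      rw [h0, List.replicate_zero]
    · rw [if_neg (by omega), if_neg (by omega), if_pos h]
      congr 1
      omega
  simp only [gaEmit]
  rw [hx c1 c2 'r' 'l', hx r1 r2 'd' 'u']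

-- the parts accumulator distributes over the fold
theorem gaFold_parts (l : List (Nat × Nat)) :
    ∀ (q : Nat × Nat) (parts : List (List Char)),
      (l.foldl gaStep (q, parts)).2 = parts ++ (l.foldl gaStep (q, [])).2 := by
  induction l with
  | nil => intro q parts; simp
  | cons p l ih =>
    intro q parts
    simp only [List.foldl_cons, gaStep, List.nil_append]
    rw [ih, ih p [gaEmit q p]]
    simp

-- main pipeline lemma: A's interleaved loop = map, None-check, fold
theorem gaLoop_eq (keyboard : List String) :
    ∀ (cs : List Char) (pos : Nat × Nat) (acc : List Char),
      gaLoop keyboard cs acc pos =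
        (if (cs.map (find_char_position keyboard)).any Option.isNone then none
         else some (acc ++
           (((cs.map (find_char_position keyboard)).reduceOption.foldl gaStep (pos, [])).2).flatten)) := by
  intro cs
  induction cs with
  | nil => intro pos acc; simp [gaLoop]
  | cons c cs ih =>
    rintro ⟨r1, c1⟩ acc
    rw [gaLoop]
    rcases hf : find_char_position keyboard c with _ | ⟨r2, c2⟩
    · simp [hf]
    · simp only []
      rw [ih]
      have hacc :
          (if r2 > r1 then (if c2 > c1 then acc ++ List.replicate (c2 - c1) 'r'
              else if c2 < c1 then acc ++ List.replicate (c1 - c2) 'l' else acc)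
                ++ List.replicate (r2 - r1) 'd'
           else if r2 < r1 then (if c2 > c1 then acc ++ List.replicate (c2 - c1) 'r'
              else if c2 < c1 then acc ++ List.replicate (c1 - c2) 'l' else acc)
                ++ List.replicate (r1 - r2) 'u'
           else (if c2 > c1 then acc ++ List.replicate (c2 - c1) 'r'
              else if c2 < c1 then acc ++ List.replicate (c1 - c2) 'l' else acc)) ++ ['p']
            = acc ++ gaEmit (r1, c1) (r2, c2) := by
        rw [gaEmit_eq]
        split_ifs <;> simp
      rw [hacc]
      simp only [List.map_cons, hf, List.any_cons, Option.isNone_some, Bool.false_or,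
        List.reduceOption_cons_of_some, List.foldl_cons]
      have hstep : gaStep ((r1, c1), ([] : List (List Char))) (r2, c2)
          = ((r2, c2), [gaEmit (r1, c1) (r2, c2)]) := rfl
      rw [hstep, gaFold_parts _ (r2, c2) [gaEmit (r1, c1) (r2, c2)]]
      split
      · rfl
      · simp

-- ===== VERDICT (by name: the statement is the Claim_ definition above) =====
theorem generate_actions_spec : Claim_equal_generate_actions := by
  intro keyboard str _
  unfold Spec_generate_actions generate_actions generate_actions_alt
  have hmap : str.toList.map (fun ch => (gaIdxBuild 0 keyboard PySem.Dict.empty).get? ch)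
      = str.toList.map (find_char_position keyboard) :=
    List.map_congr_left (fun ch _ => gaIndex_get? keyboard ch)
  rw [gaLoop_eq keyboard str.toList (0, 0) []]
  simp only [hmap]
  split
  · rfl
  · simp
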